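-- pv_equiv track=rewrite | github.com/Lucas-vdr-Horst/Mastermind-extraExercises | Mastermind/Mastermind.py | next_comb
-- ===== SOURCE A (Python) =====
-- def next_comb(previous_colors, color_am):
--     prev_colors = list(previous_colors)
--     if not prev_colors:
--         return None
--     prev_colors[-1] += 1
--     if prev_colors[-1] >= color_am:
--         prev_colors[-1] = 0
--         sub = next_comb(prev_colors[:-1], color_am)
--         if sub is None:
--             return None
--         prev_colors[:-1] = sub
--     return list(prev_colors)
-- ===== SOURCE B (Python) =====
-- def next_comb(previous_colors, color_am):
--     # Iterative odometer carry over a reversed copy: one pass, no slicing/recursion.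
--     rev = list(reversed(previous_colors))
--     for i in range(len(rev)):
--         d = rev[i] + 1
--         if d < color_am:
--             rev[i] = d
--             return list(reversed(rev))
--         rev[i] = 0
--     return None
-- ===== Notes on version B (the rewrite author's own statement) =====
-- stated objective: faster
-- what changed: Replaced the recursive prefix-slicing carry (each carry step copies the list twice) with a single iterative carry loop over a reversed copy.
import Mathlib
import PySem

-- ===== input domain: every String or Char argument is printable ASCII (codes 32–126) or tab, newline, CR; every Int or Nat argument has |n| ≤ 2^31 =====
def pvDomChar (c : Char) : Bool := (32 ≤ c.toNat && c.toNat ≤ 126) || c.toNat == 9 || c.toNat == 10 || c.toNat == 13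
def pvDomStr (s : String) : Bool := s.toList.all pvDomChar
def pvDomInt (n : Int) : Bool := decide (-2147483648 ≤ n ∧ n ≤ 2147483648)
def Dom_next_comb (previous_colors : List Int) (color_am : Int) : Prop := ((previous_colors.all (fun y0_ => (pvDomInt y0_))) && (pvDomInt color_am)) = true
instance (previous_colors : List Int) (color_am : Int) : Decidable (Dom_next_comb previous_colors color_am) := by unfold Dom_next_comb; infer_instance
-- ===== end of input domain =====

-- B replaces A's recursive prefix-slicing carry with one iterative carry pass over a
-- reversed copy (objective: faster, asymptotically in the worst case).

-- ===== PORT A =====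
-- literal transliteration of A: increment last element, on overflow recurse on the
-- prefix previous_colors[:-1] and re-attach the zeroed last digit.
def next_comb (previous_colors : List Int) (color_am : Int) : Option (List Int) :=
  if hnil : previous_colors = [] then none
  else
    let v := previous_colors.getLast! + 1
    if v ≥ color_am then
      match next_comb previous_colors.dropLast color_am with
      | none => none
      | some sub => some (sub ++ [0])
    else
      some (previous_colors.dropLast ++ [v])
termination_by previous_colors.length
decreasing_by
  have := List.length_pos_of_ne_nil hnil
  simp [List.length_dropLast]; omega

-- ===== PORT B =====
-- the `for i in range(len(rev))` carry loop of Source B: walk the reversed list from its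
-- head, stop at the first digit that does not overflow, zeroing the digits passed.
def nextCombGo (rev : List Int) (color_am : Int) : Option (List Int) :=
  match rev with
  | [] => none
  | d :: rest =>
    if d + 1 < color_am then some ((d + 1) :: rest)
    else (nextCombGo rest color_am).map (fun s => 0 :: s)

def next_comb_alt (previous_colors : List Int) (color_am : Int) : Option (List Int) :=
  (nextCombGo previous_colors.reverse color_am).map List.reverse

-- ===== PRECONDITION & SPEC =====
def Spec_next_comb (previous_colors : List Int) (color_am : Int) (out : Option (List Int)) : Prop := out = next_comb_alt previous_colors color_am
instance (previous_colors : List Int) (color_am : Int) (out : Option (List Int)) : Decidable (Spec_next_comb previous_colors color_am out) := by unfold Spec_next_comb; infer_instance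

-- ===== CLAIM (what is proved, stated in full; the proofs are below) =====
def Claim_equal_next_comb : Prop := ∀ (previous_colors : List Int) (color_am : Int), Dom_next_comb previous_colors color_am → Spec_next_comb previous_colors color_am (next_comb previous_colors color_am)

-- ===== LEMMAS AND PROOFS =====

theorem next_comb_reverse (l : List Int) (c : Int) :
    next_comb l.reverse c = (nextCombGo l c).map List.reverse := by
  induction l with
  | nil => simp [next_comb, nextCombGo]
  | cons d rest ih =>
    rw [List.reverse_cons, next_comb]
    have hne : rest.reverse ++ [d] ≠ [] := by simp
    have hlast : (rest.reverse ++ [d]).getLast! = d := by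
      cases h : rest.reverse ++ [d] with
      | nil => simp at h
      | cons a as => simp [List.getLast!, ← h]
    have hdrop : (rest.reverse ++ [d]).dropLast = rest.reverse := by
      simp
    rw [dif_neg hne]
    simp only [hlast, hdrop, nextCombGo]
    by_cases hc : d + 1 < c
    · rw [if_neg (by omega), if_pos hc]
      simp
    · rw [if_pos (by omega), if_neg hc, ih]
      cases nextCombGo rest c <;> simp

-- ===== VERDICT (by name: the statement is the Claim_ definition above) =====
theorem next_comb_spec : Claim_equal_next_comb := by
  intro pc c _
  unfold Spec_next_comb next_comb_alt
  have := next_comb_reverse pc.reverse c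
  simpa using this
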